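-- pv_equiv track=rewrite | github.com/MikeAlwaysCode/algorithm_py | Contests/CodeforcesPython/Codeforces Round 448 Div. 2/C_Square_Subsets/C_Square_Subsets.py | to_mask
-- ===== SOURCE A (Python) =====
-- primes = [2, 3, 5, 7, 11, 13, 17, 19, 23, 29, 31, 37, 41, 43, 47, 53, 59, 61, 67]
--
-- def to_mask(x: int) -> int:
--     mask = 0
--     for i, p in enumerate(primes):
--         c = 0
--         while x % p == 0:
--             x //= p
--             c += 1
--             # mask ^= 1 << i
--         mask |= (c & 1) << i
--     return mask
-- ===== SOURCE B (Python) =====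
-- primes = [2, 3, 5, 7, 11, 13, 17, 19, 23, 29, 31, 37, 41, 43, 47, 53, 59, 61, 67]
--
-- def to_mask(x: int) -> int:
--     # Peel off one smallest listed prime factor at a time and toggle its bit:
--     # the XOR of one toggle per occurrence of p_i is exactly the parity bit.
--     for i, p in enumerate(primes):
--         if x % p == 0:
--             return to_mask(x // p) ^ (1 << i)
--     return 0
-- ===== Notes on version B (the rewrite author's own statement) =====
-- stated objective: alternative
-- what changed: B is recursive and factor-driven: it repeatedly peels off one smallest listed prime factor and XOR-toggles that prime's bit, instead of A's iterative per-prime inner loop that counts the full exponent and ORs its parity (c & 1) << i into an accumulator.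
import Mathlib
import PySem

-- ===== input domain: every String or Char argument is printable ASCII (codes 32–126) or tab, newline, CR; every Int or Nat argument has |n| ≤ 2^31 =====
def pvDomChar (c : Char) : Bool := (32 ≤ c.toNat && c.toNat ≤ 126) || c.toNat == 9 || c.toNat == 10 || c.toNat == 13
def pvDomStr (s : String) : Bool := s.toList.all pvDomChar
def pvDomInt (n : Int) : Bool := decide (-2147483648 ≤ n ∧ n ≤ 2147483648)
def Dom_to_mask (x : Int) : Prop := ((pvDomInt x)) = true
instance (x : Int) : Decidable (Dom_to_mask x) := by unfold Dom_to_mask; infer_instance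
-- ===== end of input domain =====

-- B peels one smallest listed prime factor at a time recursively and XOR-toggles its bit,
-- instead of A's per-prime exponent-counting loop with (c & 1) << i; objective: alternative.

def pvPrimes : List Int := [2, 3, 5, 7, 11, 13, 17, 19, 23, 29, 31, 37, 41, 43, 47, 53, 59, 61, 67]

-- termination helper for the division loops (cited by decreasing_by)
theorem pv_div_decrease (p x : Int) (hp : 2 ≤ p) (hx : x ≠ 0) (hd : PySem.Int.mod x p = 0) :
    (PySem.Int.floordiv x p).natAbs < x.natAbs := by
  rw [PySem.Int.floordiv_eq_ediv_of_pos (by omega)]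
  obtain ⟨k, hk⟩ := (PySem.Int.mod_eq_zero_iff_dvd x p).mp hd
  subst hk
  rw [Int.mul_ediv_cancel_left _ (by omega)]
  have hk0 : k ≠ 0 := by rintro rfl; simp at hx
  have : 1 ≤ k.natAbs := Int.natAbs_pos.mpr hk0
  calc k.natAbs < 2 * k.natAbs := by omega
    _ ≤ p.natAbs * k.natAbs := by
        have : 2 ≤ p.natAbs := by omega
        exact Nat.mul_le_mul_right _ this
    _ = (p * k).natAbs := (Int.natAbs_mul p k).symm

theorem pv_primes_two_le : ∀ q ∈ pvPrimes.zipIdx, 2 ≤ q.1 := by decide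

-- ===== PORT A =====
-- inner `while x % p == 0: x //= p; c += 1`  (the 2 ≤ p / x ≠ 0 conjuncts only make the
-- recursion total; every call site has 2 ≤ p, and x = 0 is excluded by Pre_: Python loops forever there)
def pvCount (p x : Int) : Nat × Int :=
  if h : 2 ≤ p ∧ x ≠ 0 ∧ PySem.Int.mod x p = 0 then
    let r := pvCount p (PySem.Int.floordiv x p)
    (r.1 + 1, r.2)
  else (0, x)
termination_by x.natAbs
decreasing_by exact pv_div_decrease p x h.1 h.2.1 h.2.2

def pvStepA (s : Nat × Int) (pi : Int × Nat) : Nat × Int :=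
  let r := pvCount pi.1 s.2
  (s.1 ||| ((r.1 &&& 1) <<< pi.2), r.2)

def to_mask (x : Int) : Int :=
  ((pvPrimes.zipIdx.foldl pvStepA (0, x)).1 : Int)

-- ===== PORT B =====
-- `for i, p in enumerate(primes): if x % p == 0: return to_mask(x // p) ^ (1 << i)`; `return 0`
-- (the x ≠ 0 guard only makes the recursion total; x = 0 is excluded by Pre_: Python recurses forever there)
def pvB (x : Int) : Nat :=
  match h : pvPrimes.zipIdx.find? (fun q => PySem.Int.mod x q.1 == 0) with
  | some q =>
      if hx : x = 0 then 0
      else pvB (PySem.Int.floordiv x q.1) ^^^ ((1 : Nat) <<< q.2)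
  | none => 0
termination_by x.natAbs
decreasing_by
  exact pv_div_decrease q.1 x (pv_primes_two_le q (List.mem_of_find?_eq_some h)) hx
    (by simpa using List.find?_some h)

def to_mask_alt (x : Int) : Int := (pvB x : Int)

-- ===== PRECONDITION & SPEC =====
-- Pre_ excludes only zero, on which both Pythons fail to terminate (A's inner while loops forever, B recurses forever).
def Pre_to_mask (x : Int) : Prop := x ≠ 0
instance (x : Int) : Decidable (Pre_to_mask x) := by unfold Pre_to_mask; infer_instance
def pvWitness_to_mask : Int := 12

def Spec_to_mask (x : Int) (out : Int) : Prop := out = to_mask_alt x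
instance (x : Int) (out : Int) : Decidable (Spec_to_mask x out) := by unfold Spec_to_mask; infer_instance

-- ===== CLAIM (what is proved, stated in full; the proofs are below) =====
def Claim_equal_to_mask : Prop := ∀ (x : Int), Dom_to_mask x → Pre_to_mask x → Spec_to_mask x (to_mask x)

-- ===== LEMMAS AND PROOFS =====

theorem pvCount_snd_ne_zero (p : Int) : ∀ (x : Int), x ≠ 0 → (pvCount p x).2 ≠ 0 := by
  suffices H : ∀ (n : Nat) (x : Int), x.natAbs ≤ n → x ≠ 0 → (pvCount p x).2 ≠ 0 from
    fun x hx => H x.natAbs x le_rfl hx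
  intro n
  induction n with
  | zero => intro x hle hx; exact absurd (Int.natAbs_eq_zero.mp (by omega)) hx
  | succ n ih =>
      intro x hle hx
      rw [pvCount]
      split
      · next h =>
          have hdec := pv_div_decrease p x h.1 h.2.1 h.2.2
          have hne : PySem.Int.floordiv x p ≠ 0 := by
            intro h0
            obtain ⟨k, hk⟩ := (PySem.Int.mod_eq_zero_iff_dvd x p).mp h.2.2
            rw [PySem.Int.floordiv_eq_ediv_of_pos (by omega), hk,
              Int.mul_ediv_cancel_left _ (by omega : p ≠ 0)] at h0
            exact hx (by rw [hk, h0, mul_zero])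
          exact ih _ (by omega) hne
      · exact hx

-- A's exact-division step: pvCount p (p*y) counts one more than pvCount p y, same residual
theorem pvCount_mul_self (p y : Int) (hp : 2 ≤ p) (hy : y ≠ 0) :
    pvCount p (p * y) = ((pvCount p y).1 + 1, (pvCount p y).2) := by
  have hp0 : p ≠ 0 := by omega
  have hd : PySem.Int.mod (p * y) p = 0 := (PySem.Int.mod_eq_zero_iff_dvd _ p).mpr ⟨y, rfl⟩
  have hq : PySem.Int.floordiv (p * y) p = y := by
    rw [PySem.Int.floordiv_eq_ediv_of_pos (by omega), Int.mul_ediv_cancel_left _ hp0]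
  rw [pvCount, dif_pos ⟨hp, mul_ne_zero hp0 hy, hd⟩]
  simp [hq]

-- A coprime factor p passes through pvCount q untouched
theorem pvCount_mul_coprime (q p : Int) (hq : 2 ≤ q) (hcop : Int.gcd q p = 1) (hp0 : p ≠ 0) :
    ∀ (y : Int), y ≠ 0 → pvCount q (p * y) = ((pvCount q y).1, p * (pvCount q y).2) := by
  have hq0 : q ≠ 0 := by omega
  suffices H : ∀ (n : Nat) (y : Int), y.natAbs ≤ n → y ≠ 0 →
      pvCount q (p * y) = ((pvCount q y).1, p * (pvCount q y).2) from
    fun y hy => H y.natAbs y le_rfl hy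
  intro n
  induction n with
  | zero => intro y hle hy; exact absurd (Int.natAbs_eq_zero.mp (by omega)) hy
  | succ n ih =>
      intro y hle hy
      have hcop' : IsCoprime q p := Int.isCoprime_iff_gcd_eq_one.mpr hcop
      by_cases hd : PySem.Int.mod y q = 0
      · obtain ⟨z, hz⟩ := (PySem.Int.mod_eq_zero_iff_dvd y q).mp hd
        have hz0 : z ≠ 0 := by rintro rfl; exact hy (by rw [hz, mul_zero])
        have hdy : PySem.Int.mod (p * y) q = 0 :=
          (PySem.Int.mod_eq_zero_iff_dvd _ q).mpr ⟨p * z, by rw [hz]; ring⟩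
        have hfy : PySem.Int.floordiv y q = z := by
          rw [PySem.Int.floordiv_eq_ediv_of_pos (by omega), hz, Int.mul_ediv_cancel_left _ hq0]
        have hfpy : PySem.Int.floordiv (p * y) q = p * z := by
          rw [PySem.Int.floordiv_eq_ediv_of_pos (by omega), hz,
            (by ring : p * (q * z) = q * (p * z)), Int.mul_ediv_cancel_left _ hq0]
        have hzn : z.natAbs < y.natAbs := by
          have h1 : y.natAbs = q.natAbs * z.natAbs := by rw [hz, Int.natAbs_mul]
          have h2 : 2 ≤ q.natAbs := by omega
          have h3 : 1 ≤ z.natAbs := Int.natAbs_pos.mpr hz0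
          nlinarith
        have ihz := ih z (by omega) hz0
        rw [pvCount, dif_pos ⟨hq, mul_ne_zero hp0 hy, hdy⟩]
        conv_rhs => rw [pvCount, dif_pos ⟨hq, hy, hd⟩]
        simp only [hfy, hfpy, ihz]
      · have hdy : ¬ PySem.Int.mod (p * y) q = 0 := by
          intro hc
          exact hd ((PySem.Int.mod_eq_zero_iff_dvd y q).mpr
            (hcop'.dvd_of_dvd_mul_left ((PySem.Int.mod_eq_zero_iff_dvd _ q).mp hc)))
        rw [pvCount, dif_neg (by tauto)]
        conv_rhs => rw [pvCount, dif_neg (by tauto)]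

-- the mask accumulator only ever ORs in new bits: split it off
theorem pv_fold_mask_split (ps : List (Int × Nat)) :
    ∀ (m : Nat) (x : Int),
      ps.foldl pvStepA (m, x) =
        (m ||| (ps.foldl pvStepA (0, x)).1, (ps.foldl pvStepA (0, x)).2) := by
  induction ps with
  | nil => intro m x; simp
  | cons q qs ih =>
      intro m x
      simp only [List.foldl_cons, pvStepA]
      rw [ih (m ||| _), ih (0 ||| _)]
      simp [Nat.or_assoc]

-- a one-bit value shifted to position j has no bit at k ≠ j
theorem pv_shift_bit_ne (a j k : Nat) (ha : a < 2) (hk : k ≠ j) : (a <<< j).testBit k = false := by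
  rcases Nat.lt_or_ge k j with h | h
  · simp [Nat.testBit_shiftLeft, Nat.not_le.mpr h]
  · have h1 : 1 ≤ k - j := by omega
    have h2 : a < 2 ^ (k - j) :=
      lt_of_lt_of_le ha (by simpa using Nat.pow_le_pow_right (by omega : 1 ≤ 2) h1)
    simp [Nat.testBit_shiftLeft, h, Nat.testBit_lt_two_pow h2]

theorem pv_shift_bit_self (a j : Nat) : (a <<< j).testBit j = a.testBit 0 := by
  simp [Nat.testBit_shiftLeft]

-- bits of the fold's mask (from 0) lie only at the indices occurring in ps
theorem pv_fold_testBit (ps : List (Int × Nat)) :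
    ∀ (x : Int) (i : Nat), (∀ q ∈ ps, q.2 ≠ i) →
      ((ps.foldl pvStepA (0, x)).1).testBit i = false := by
  induction ps with
  | nil => intro x i _; simp
  | cons q qs ih =>
      intro x i hi
      simp only [List.foldl_cons, pvStepA]
      rw [pv_fold_mask_split qs (0 ||| (((pvCount q.1 x).1 &&& 1) <<< q.2)) (pvCount q.1 x).2]
      have h1 : (((pvCount q.1 x).1 &&& 1) <<< q.2).testBit i = false :=
        pv_shift_bit_ne _ _ _ (by rw [Nat.and_one_is_mod]; omega)
          (fun hc => hi q (by simp) hc.symm)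
      simp only [Nat.zero_or, Nat.testBit_or, h1, Bool.false_or]
      exact ih _ i (fun r hr => hi r (List.mem_cons_of_mem _ hr))

-- key lemma: multiplying the running value by a listed prime p (index i) XOR-toggles bit i of A's fold
theorem pv_fold_mul (ps : List (Int × Nat))
    (hps : ∀ q ∈ ps, 2 ≤ q.1)
    (hpw : ps.Pairwise (fun a b => Int.gcd a.1 b.1 = 1 ∧ a.2 ≠ b.2)) :
    ∀ (p : Int) (i : Nat), (p, i) ∈ ps → ∀ (y : Int), y ≠ 0 →
      (ps.foldl pvStepA (0, p * y)).1 = (ps.foldl pvStepA (0, y)).1 ^^^ (1 <<< i) := by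
  induction ps with
  | nil => intro p i hmem; exact absurd hmem (by simp)
  | cons q qs ih =>
      intro p i hmem y hy
      have hq2 : 2 ≤ q.1 := hps q (by simp)
      have hp2 : 2 ≤ p := hps (p, i) hmem
      rcases List.mem_cons.mp hmem with heq | htail
      · -- (p, i) is the head pair
        cases heq
        simp only [List.foldl_cons, pvStepA]
        rw [pvCount_mul_self p y hp2 hy]
        simp only [Nat.zero_or]
        generalize (pvCount p y).2 = r
        generalize (pvCount p y).1 = c
        rw [pv_fold_mask_split qs (((c + 1) &&& 1) <<< i) r,
          pv_fold_mask_split qs ((c &&& 1) <<< i) r]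
        have hTbit : ((qs.foldl pvStepA (0, r)).1).testBit i = false := by
          apply pv_fold_testBit
          intro s hs hsi
          exact ((List.pairwise_cons.mp hpw).1 s hs).2 hsi.symm
        apply Nat.eq_of_testBit_eq
        intro k
        by_cases hk : k = i
        · subst hk
          simp only [Nat.testBit_or, Nat.testBit_xor, pv_shift_bit_self,
            Nat.and_one_is_mod, hTbit, Bool.or_false]
          rcases Nat.mod_two_eq_zero_or_one c with h0 | h0
          · have h1 : (c + 1) % 2 = 1 := by omega
            rw [h0, h1]; decide
          · have h1 : (c + 1) % 2 = 0 := by omega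
            rw [h0, h1]; decide
        · have hbit1 := pv_shift_bit_ne ((c + 1) &&& 1) i k (by rw [Nat.and_one_is_mod]; omega) hk
          have hbit2 := pv_shift_bit_ne (c &&& 1) i k (by rw [Nat.and_one_is_mod]; omega) hk
          have hbit3 := pv_shift_bit_ne 1 i k (by omega) hk
          simp only [Nat.testBit_or, Nat.testBit_xor, hbit1, hbit2, hbit3,
            Bool.false_or, Bool.xor_false]
      · -- (p, i) lies in the tail
        have hpair := (List.pairwise_cons.mp hpw).1 (p, i) htail
        have hcop : Int.gcd q.1 p = 1 := hpair.1
        have hji : q.2 ≠ i := hpair.2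
        simp only [List.foldl_cons, pvStepA]
        rw [pvCount_mul_coprime q.1 p hq2 hcop (by omega) y hy]
        simp only [Nat.zero_or]
        have hr0 : (pvCount q.1 y).2 ≠ 0 := pvCount_snd_ne_zero q.1 y hy
        generalize hr : (pvCount q.1 y).2 = r at hr0
        generalize (pvCount q.1 y).1 = c
        rw [pv_fold_mask_split qs ((c &&& 1) <<< q.2) (p * r),
          pv_fold_mask_split qs ((c &&& 1) <<< q.2) r]
        rw [ih (fun s hs => hps s (List.mem_cons_of_mem _ hs)) (List.pairwise_cons.mp hpw).2
          p i htail r hr0]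
        have hbbit : ((c &&& 1) <<< q.2).testBit i = false :=
          pv_shift_bit_ne _ _ _ (by rw [Nat.and_one_is_mod]; omega) (fun hc => hji hc.symm)
        apply Nat.eq_of_testBit_eq
        intro k
        by_cases hk : k = i
        · subst hk
          simp only [Nat.testBit_or, Nat.testBit_xor, pv_shift_bit_self, hbbit, Bool.false_or]
        · have h1 := pv_shift_bit_ne 1 i k (by omega) hk
          simp only [Nat.testBit_or, Nat.testBit_xor, h1, Bool.xor_false]

-- when no listed prime divides x, A's fold leaves the state unchanged
theorem pv_fold_no_factor (ps : List (Int × Nat)) :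
    ∀ (m : Nat) (x : Int), (∀ q ∈ ps, ¬ PySem.Int.mod x q.1 = 0) →
      ps.foldl pvStepA (m, x) = (m, x) := by
  induction ps with
  | nil => intro m x _; rfl
  | cons q qs ih =>
      intro m x hx
      simp only [List.foldl_cons, pvStepA]
      rw [pvCount, dif_neg (fun h => hx q (by simp) h.2.2)]
      simp only [Nat.zero_and, Nat.zero_shiftLeft, Nat.or_zero]
      exact ih m x (fun r hr => hx r (List.mem_cons_of_mem _ hr))

theorem pv_primes_props :
    (pvPrimes.zipIdx.Pairwise (fun a b => Int.gcd a.1 b.1 = 1 ∧ a.2 ≠ b.2)) := by decide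

theorem pv_main : ∀ (x : Int), x ≠ 0 →
    (pvPrimes.zipIdx.foldl pvStepA (0, x)).1 = pvB x := by
  suffices H : ∀ (n : Nat) (x : Int), x.natAbs ≤ n → x ≠ 0 →
      (pvPrimes.zipIdx.foldl pvStepA (0, x)).1 = pvB x from
    fun x hx => H x.natAbs x le_rfl hx
  intro n
  induction n with
  | zero => intro x hle hx; exact absurd (Int.natAbs_eq_zero.mp (by omega)) hx
  | succ n ih =>
      intro x hle hx
      rcases hfind : pvPrimes.zipIdx.find? (fun q => PySem.Int.mod x q.1 == 0) with _ | q
      · -- no listed prime divides x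
        rw [pv_fold_no_factor _ 0 x (by
          intro r hr hmod
          have := List.find?_eq_none.mp hfind r hr
          simp [hmod] at this)]
        rw [pvB, hfind]
      · have hmem : q ∈ pvPrimes.zipIdx := List.mem_of_find?_eq_some hfind
        have hmod : PySem.Int.mod x q.1 = 0 := by simpa using List.find?_some hfind
        have hq2 : 2 ≤ q.1 := pv_primes_two_le q hmem
        obtain ⟨y, hy⟩ := (PySem.Int.mod_eq_zero_iff_dvd x q.1).mp hmod
        have hy0 : y ≠ 0 := by rintro rfl; exact hx (by rw [hy, mul_zero])
        have hfl : PySem.Int.floordiv x q.1 = y := by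
          rw [PySem.Int.floordiv_eq_ediv_of_pos (by omega), hy,
            Int.mul_ediv_cancel_left _ (by omega)]
        have hdec := pv_div_decrease q.1 x hq2 hx hmod
        rw [pvB, hfind]
        simp only
        rw [dif_neg (by exact fun h => hx h)]
        rw [hfl, ← ih y (by rw [hfl] at hdec; omega) hy0]
        conv_lhs => rw [hy]
        exact pv_fold_mul pvPrimes.zipIdx pv_primes_two_le pv_primes_props q.1 q.2
          (by simpa using hmem) y hy0

-- ===== VERDICT (by name: the statement is the Claim_ definition above) =====
theorem to_mask_spec : Claim_equal_to_mask := by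
  intro x _ hx
  unfold Spec_to_mask to_mask to_mask_alt
  rw [pv_main x hx]
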